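-- pv_equiv track=rewrite | github.com/Balzard/TFIDF-and-PPMI | nlp_projet2.py | compute_df
-- ===== SOURCE A (Python) =====
-- def get_context(text: list, target: int, size_context: int) -> list:
--   """Create context window
--
--   Args:
--       text (list): text corpus as single sequence of words
--       target (int): position in text
--       size_context (int): number of word a the right or left of the target word in the contextual window
--
--   Returns:
--       list: context window
--   """
--
--   text_size = len(text)
--
--   if target < size_context:
--       context = [text[i] for i in range(target)] + [text[i] for i in range(target + 1, target + size_context + 1)]
--
--   elif target > text_size - 1 - size_context:
--     context = [text[i] for i in range(target - size_context, target)] + [text[i] for i in range(target + 1, len(text))]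
--
--   else:
--     context = [text[i] for i in range(target - size_context, target)] + [text[i] for i in range(target + 1, target + size_context + 1)]
--
--   return context
--
-- def compute_df(text: list, words: list, windows_size: int) -> dict:
--   """Compute the number of contextual windows of any target word where this context word occurs
--
--   Args:
--       text (list): text corpus as a single sequence of text
--       words (list): words of text corpus
--       windows_size (int): size of contextual windows (assumed to be odd)
--
--   Returns:
--       dict: dictionnary where each key is a word and its value is the number of contextual windows where this word occurs
--   """
--
--   df = {k:0 for k in words}
--   size_context = round(windows_size/2)
--
--   for target in range(len(text)):
--
--     context = set(get_context(text, target, size_context))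
--
--     for word in context:
--       df[word] += 1
--
--   return df
-- ===== SOURCE B (Python) =====
-- def compute_df(text: list, words: list, windows_size: int) -> dict:
--   """Per-word interval sweep: for each word, count the targets covered by the
--   union of windows [p-sc, p+sc] around its occurrences, minus the occurrences
--   covered only by themselves.  One pass over the text, one pass per word's
--   occurrence list."""
--   df = {k: 0 for k in words}
--   sc = round(windows_size / 2)
--   n = len(text)
--   if sc <= 0 or n == 0:
--     return df
--
--   occ = {}
--   for i, w in enumerate(text):
--     occ.setdefault(w, []).append(i)
--
--   for w in list(df):
--     if w not in occ:
--       continue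
--     ps = occ[w]
--     # size of the union of the clamped intervals [p-sc, p+sc] over p in ps
--     covered = 0
--     cur = None
--     for p in ps:
--       lo, hi = max(0, p - sc), min(n - 1, p + sc)
--       if cur is None:
--         cur = (lo, hi)
--       elif lo <= cur[1] + 1:
--         cur = (cur[0], max(cur[1], hi))
--       else:
--         covered += cur[1] - cur[0] + 1
--         cur = (lo, hi)
--     covered += cur[1] - cur[0] + 1
--     # occurrences whose window contains no OTHER occurrence of w
--     prev = None
--     for j, p in enumerate(ps):
--       nxt = ps[j + 1] if j + 1 < len(ps) else None
--       near = (prev is not None and p - prev <= sc) or (nxt is not None and nxt - p <= sc)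
--       if not near:
--         covered -= 1
--       prev = p
--     df[w] = covered
--   return df
-- ===== Notes on version B (the rewrite author's own statement) =====
-- stated objective: faster
-- what changed: A rebuilds and dedupes a window of ~2*sc words around every target position (O(n*sc)); B indexes occurrence positions per word in one pass and, per word, sweeps its sorted occurrence list once, measuring the union of the clamped intervals [p-sc, p+sc] and subtracting occurrences whose window contains no other occurrence of the same word (O(n + total occurrences)).
import Mathlib
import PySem

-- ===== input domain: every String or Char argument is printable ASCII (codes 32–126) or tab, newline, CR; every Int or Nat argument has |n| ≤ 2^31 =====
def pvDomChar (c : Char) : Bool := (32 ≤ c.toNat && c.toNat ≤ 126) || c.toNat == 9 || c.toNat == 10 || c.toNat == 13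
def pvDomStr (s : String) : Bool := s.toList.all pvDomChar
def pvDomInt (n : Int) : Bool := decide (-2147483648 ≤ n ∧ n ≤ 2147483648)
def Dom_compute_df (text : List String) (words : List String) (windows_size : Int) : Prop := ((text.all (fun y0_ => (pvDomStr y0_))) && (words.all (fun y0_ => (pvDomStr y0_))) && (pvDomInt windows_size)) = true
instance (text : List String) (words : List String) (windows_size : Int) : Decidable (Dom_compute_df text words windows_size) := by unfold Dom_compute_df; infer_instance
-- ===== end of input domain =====

-- B replaces A's per-target window construction (O(n·window)) by a per-word sweep over the
-- union of occurrence intervals [p-sc, p+sc] minus self-only occurrences (O(n) after indexing).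

-- ===== PORT A =====

-- round(windows_size/2): windows_size/2 is an exact float for |windows_size| ≤ 2^31, so this is
-- the quotient for even windows_size and round-half-to-even of k + 0.5 for odd windows_size.
def roundHalfDiv2 (ws : Int) : Int :=
  if PySem.Int.mod ws 2 = 0 then PySem.Int.floordiv ws 2
  else
    let k := PySem.Int.floordiv ws 2
    if PySem.Int.mod k 2 = 0 then k else k + 1

def get_context (text : List String) (target : Int) (size_context : Int) : List String :=
  let text_size := PySem.List.len text
  if target < size_context then
    (PySem.List.pyRange 0 target).map (fun i => PySem.List.pyGetD text i "")
      ++ (PySem.List.pyRange (target + 1) (target + size_context + 1)).map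
           (fun i => PySem.List.pyGetD text i "")
  else if target > text_size - 1 - size_context then
    (PySem.List.pyRange (target - size_context) target).map (fun i => PySem.List.pyGetD text i "")
      ++ (PySem.List.pyRange (target + 1) (PySem.List.len text)).map
           (fun i => PySem.List.pyGetD text i "")
  else
    (PySem.List.pyRange (target - size_context) target).map (fun i => PySem.List.pyGetD text i "")
      ++ (PySem.List.pyRange (target + 1) (target + size_context + 1)).map
           (fun i => PySem.List.pyGetD text i "")

-- 'for word in context: df[word] += 1' iterates a Python set (hash order): with every key already
-- present the resulting dict does not depend on that order, so the fold over the PySem.Set list is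
-- exact.  df[word] on a missing key (KeyError) and text[i] out of range (IndexError) are excluded
-- by Pre_compute_df; within it 'modify' is exact.
def compute_df (text : List String) (words : List String) (windows_size : Int) :
    List (String × Int) :=
  let df := words.foldl (fun d k => d.insert k 0) PySem.Dict.empty
  let size_context := roundHalfDiv2 windows_size
  let final := (PySem.List.pyRange 0 (PySem.List.len text)).foldl
      (fun d target =>
        (PySem.Set.ofList (get_context text target size_context)).foldl
          (fun d word => d.modify word 0 (· + 1)) d) df
  final.items

-- ===== PORT B =====

def mergeStep (n sc : Int) (st : Int × Option (Int × Int)) (p : Int) : Int × Option (Int × Int) :=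
  let lo := max 0 (p - sc)
  let hi := min (n - 1) (p + sc)
  match st with
  | (c, none) => (c, some (lo, hi))
  | (c, some (l, r)) =>
      if lo ≤ r + 1 then (c, some (l, max r hi))
      else (c + (r - l + 1), some (lo, hi))

def unionSize (n sc : Int) (ps : List Int) : Int :=
  match ps.foldl (mergeStep n sc) (0, none) with
  | (c, none) => c
  | (c, some (l, r)) => c + (r - l + 1)

def isoCount (sc : Int) (prev : Option Int) : List Int → Int
  | [] => 0
  | p :: rest =>
      let near :=
        (match prev with | some a => decide (p - a ≤ sc) | none => false) ||
        (match rest.head? with | some q => decide (q - p ≤ sc) | none => false)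
      (if near then 0 else 1) + isoCount sc (some p) rest

def compute_df_alt (text : List String) (words : List String) (windows_size : Int) :
    List (String × Int) :=
  let df := words.foldl (fun d k => d.insert k 0) PySem.Dict.empty
  let sc := roundHalfDiv2 windows_size
  let n := PySem.List.len text
  if sc ≤ 0 ∨ n = 0 then df.items
  else
    let occ := (PySem.List.enumerate text 0).foldl
        (fun d q => d.modify q.2 [] (fun l => l ++ [q.1])) PySem.Dict.empty
    let final := df.keys.foldl
        (fun d w =>
          if occ.contains w then
            let ps := occ.getD w []
            d.insert w (unionSize n sc ps - isoCount sc none ps)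
          else d) df
    final.items

-- ===== PRECONDITION & SPEC =====
-- Pre_ is exactly where A returns: outside it A raises IndexError (a window reaching past the end
-- of a nonempty text, i.e. 0 < sc and len text < 2*sc) or KeyError (a text word missing from words
-- that occurs in some window).
def Pre_compute_df (text : List String) (words : List String) (windows_size : Int) : Prop :=
  roundHalfDiv2 windows_size ≤ 0 ∨ text = [] ∨
    (2 * roundHalfDiv2 windows_size ≤ PySem.List.len text ∧ ∀ w ∈ text, w ∈ words)
instance (text : List String) (words : List String) (windows_size : Int) :
    Decidable (Pre_compute_df text words windows_size) := by
  unfold Pre_compute_df; infer_instance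

def pvWitness_compute_df : List String × List String × Int := (["a", "b"], ["a", "b"], 2)

def Spec_compute_df (text : List String) (words : List String) (windows_size : Int)
    (out : List (String × Int)) : Prop := out = compute_df_alt text words windows_size
instance (text : List String) (words : List String) (windows_size : Int)
    (out : List (String × Int)) : Decidable (Spec_compute_df text words windows_size out) := by
  unfold Spec_compute_df; infer_instance

-- ===== CLAIM (what is proved, stated in full; the proofs are below) =====
def Claim_equal_compute_df : Prop := ∀ (text : List String) (words : List String) (windows_size : Int), Dom_compute_df text words windows_size → Pre_compute_df text words windows_size → Spec_compute_df text words windows_size (compute_df text words windows_size)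

-- ===== LEMMAS AND PROOFS =====

-- t is covered by some occurrence window [p-sc, p+sc]
def covB (sc : Int) (ps : List Int) (t : Int) : Bool :=
  ps.any (fun p => decide (p - sc ≤ t ∧ t ≤ p + sc))
-- t is covered by the window of an occurrence OTHER than t itself
def othB (sc : Int) (ps : List Int) (t : Int) : Bool :=
  ps.any (fun p => decide (p ≠ t ∧ p - sc ≤ t ∧ t ≤ p + sc))
-- the (increasing) list of positions of w in text
def psOf (text : List String) (w : String) : List Int :=
  (PySem.List.pyRange 0 (PySem.List.len text)).filter
    (fun j => PySem.List.pyGetD text j "" == w)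
-- B's occurrence index
def occD (text : List String) : PySem.Dict String (List Int) :=
  (PySem.List.enumerate text 0).foldl
    (fun d q => d.modify q.2 [] (fun l => l ++ [q.1])) PySem.Dict.empty
def totalOf (st : Int × Option (Int × Int)) : Int :=
  match st with
  | (c, none) => c
  | (c, some (l, r)) => c + (r - l + 1)

lemma sorted_ext {xs ys : List Int} (hx : xs.Pairwise (· < ·)) (hy : ys.Pairwise (· < ·))
    (h : ∀ t, t ∈ xs ↔ t ∈ ys) : xs = ys := by
  have hnx : xs.Nodup := hx.imp (fun h => ne_of_lt h)
  have hny : ys.Nodup := hy.imp (fun h => ne_of_lt h)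
  exact List.Perm.eq_of_pairwise (fun a b _ _ h1 h2 => by omega) hx hy
    ((List.perm_ext_iff_of_nodup hnx hny).mpr h)

lemma mem_psOf {text : List String} {w : String} {p : Int} :
    p ∈ psOf text w ↔ (0 ≤ p ∧ p < PySem.List.len text) ∧ PySem.List.pyGetD text p "" = w := by
  unfold psOf
  simp [List.mem_filter, PySem.List.mem_pyRange_one]

lemma pairwise_psOf (text : List String) (w : String) : (psOf text w).Pairwise (· < ·) := by
  exact (PySem.List.pairwise_lt_pyRange_one 0 _).filter _

lemma psOf_ne_nil {text : List String} {w : String} (h : w ∈ text) : psOf text w ≠ [] := by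
  obtain ⟨j, hj, hget⟩ := List.mem_iff_getElem.mp h
  intro hnil
  have hmem : (j : Int) ∈ psOf text w := by
    apply mem_psOf.mpr
    refine ⟨⟨by omega, ?_⟩, ?_⟩
    · simp [PySem.List.len_eq]; exact_mod_cast hj
    · rw [PySem.List.pyGetD_natCast]
      rw [List.getD_eq_getElem _ _ hj]
      exact hget
  rw [hnil] at hmem
  exact absurd hmem (List.not_mem_nil)

lemma psOf_eq_nil {text : List String} {w : String} (h : w ∉ text) : psOf text w = [] := by
  rw [List.eq_nil_iff_forall_not_mem]
  intro p hp
  obtain ⟨⟨h0, hn⟩, hw⟩ := mem_psOf.mp hp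
  apply h
  rw [← hw]
  apply PySem.List.pyGetD_mem
  unfold PySem.Raise.InRange
  simp [PySem.List.len_eq] at hn ⊢
  omega

lemma occD_getD (text : List String) (w : String) : (occD text).getD w [] = psOf text w := by
  unfold occD
  rw [PySem.List.enumerate_eq_map_pyRange text ""]
  rw [List.foldl_map]
  rw [show (fun (d : PySem.Dict String (List Int)) (j : Int) =>
        d.modify (j, PySem.List.pyGetD text j "").2 [] (fun l => l ++ [(j, PySem.List.pyGetD text j "").1]))
      = (fun (d : PySem.Dict String (List Int)) (j : Int) =>
        d.modify (PySem.List.pyGetD text j "") [] (fun l => l ++ [j])) from rfl]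
  rw [← List.foldl_map (f := fun j => (PySem.List.pyGetD text j "", j))
      (g := fun (d : PySem.Dict String (List Int)) (p : String × Int) =>
        d.modify p.1 [] (fun l => l ++ [p.2]))]
  rw [PySem.Dict.getD_foldl_modify_append]
  rw [PySem.Dict.getD_empty]
  unfold psOf
  rw [List.filter_map, List.map_map]
  simp only [Function.comp_def, List.nil_append]
  exact List.map_id' _

lemma occD_contains (text : List String) (w : String) :
    (occD text).contains w = true ↔ w ∈ text := by
  rw [PySem.Dict.contains_iff_mem_keys]
  unfold occD
  rw [PySem.Dict.keys_foldl_modify_key (PySem.List.enumerate text 0) (fun q => q.2) []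
      (fun _ q => fun l => l ++ [q.1]) PySem.Dict.empty]
  rw [PySem.List.map_snd_enumerate]
  rw [show (PySem.Dict.empty : PySem.Dict String (List Int)).keys = ([] : List String) from rfl]
  rw [show PySem.Set.update ([] : List String) text = PySem.Set.ofList text from
    PySem.Set.update_empty text]
  exact PySem.Set.mem_ofList text w

lemma count_interval (n a b : Int) (ha : -1 ≤ a) (hb : b < n) :
    (PySem.List.pyRange 0 n).countP (fun t => decide (a < t ∧ t ≤ b)) = (b - a).toNat := by
  rw [List.countP_eq_length_filter]
  have hf : (PySem.List.pyRange 0 n).filter (fun t => decide (a < t ∧ t ≤ b))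
      = PySem.List.pyRange (a + 1) (b + 1) := by
    apply sorted_ext
    · exact (PySem.List.pairwise_lt_pyRange_one 0 n).filter _
    · exact PySem.List.pairwise_lt_pyRange_one _ _
    · intro t
      simp [List.mem_filter, PySem.List.mem_pyRange_one]
      omega
  rw [hf, PySem.List.length_pyRange_one]
  congr 1
  omega

lemma countP_disjoint {l : List Int} (p q : Int → Bool)
    (h : ∀ x ∈ l, ¬(p x = true ∧ q x = true)) :
    l.countP (fun x => p x || q x) = l.countP p + l.countP q := by
  induction l with
  | nil => simp
  | cons a l ih =>
    have ha := h a (List.mem_cons_self)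
    rw [List.countP_cons, List.countP_cons, List.countP_cons,
      ih (fun x hx => h x (List.mem_cons_of_mem a hx))]
    cases hp : p a <;> cases hq : q a <;> simp [hp, hq] at ha ⊢ <;> omega

lemma merge_go (n sc : Int) (hsc : 0 < sc) (rest : List Int) :
    ∀ (c l r : Int), rest.Pairwise (· < ·) → (∀ p ∈ rest, 0 ≤ p ∧ p < n) → 0 ≤ r → r < n →
    totalOf (rest.foldl (mergeStep n sc) (c, some (l, r))) =
      c + (r - l + 1) +
        ((PySem.List.pyRange 0 n).countP (fun t => decide (r < t) && covB sc rest t) : Int) := by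
  induction rest with
  | nil =>
    intro c l r _ _ _ _
    simp [totalOf, covB]
  | cons p rest ih =>
    intro c l r hpair hmem h0r hrn
    obtain ⟨hp0, hpn⟩ := hmem p List.mem_cons_self
    have hhd := (List.pairwise_cons.mp hpair).1
    have hpairt := (List.pairwise_cons.mp hpair).2
    have hmemt : ∀ q ∈ rest, 0 ≤ q ∧ q < n := fun q hq => hmem q (List.mem_cons_of_mem p hq)
    rw [List.foldl_cons]
    set lo := max 0 (p - sc) with hlo
    set hi := min (n - 1) (p + sc) with hhi
    have hms : mergeStep n sc (c, some (l, r)) p =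
        (if lo ≤ r + 1 then (c, some (l, max r hi))
         else (c + (r - l + 1), some (lo, hi))) := rfl
    rw [hms]
    by_cases hcase : lo ≤ r + 1
    · rw [if_pos hcase]
      rw [ih c l (max r hi) hpairt hmemt (by omega) (by omega)]
      have hsplit : (PySem.List.pyRange 0 n).countP
            (fun t => decide (r < t) && covB sc (p :: rest) t)
          = (PySem.List.pyRange 0 n).countP (fun t => decide (r < t ∧ t ≤ max r hi))
            + (PySem.List.pyRange 0 n).countP
                (fun t => decide (max r hi < t) && covB sc rest t) := by
        rw [← countP_disjoint _ _ (by
          intro x _ hx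
          simp only [Bool.and_eq_true, decide_eq_true_eq] at hx
          omega)]
        apply List.countP_congr
        intro t ht
        have ht' := PySem.List.mem_pyRange_one.mp ht
        simp only [covB, List.any_eq_true, List.mem_cons, Bool.and_eq_true, Bool.or_eq_true,
          decide_eq_true_eq]
        constructor
        · rintro ⟨hrt, q, (rfl | hq), hcov⟩
          · left; omega
          · by_cases ht2 : t ≤ max r hi
            · left; omega
            · right; exact ⟨by omega, q, hq, hcov⟩
        · rintro (⟨ha, hb⟩ | ⟨ha, q, hq, hcov⟩)
          · exact ⟨ha, p, Or.inl rfl, by omega⟩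
          · exact ⟨by omega, q, Or.inr hq, hcov⟩
      rw [hsplit, count_interval n r (max r hi) (by omega) (by omega)]
      have hcast : ((max r hi - r).toNat : Int) = max r hi - r := Int.toNat_of_nonneg (by omega)
      push_cast [hcast]
      ring
    · rw [if_neg hcase]
      rw [ih (c + (r - l + 1)) lo hi hpairt hmemt (by omega) (by omega)]
      have hsplit : (PySem.List.pyRange 0 n).countP
            (fun t => decide (r < t) && covB sc (p :: rest) t)
          = (PySem.List.pyRange 0 n).countP (fun t => decide (lo - 1 < t ∧ t ≤ hi))
            + (PySem.List.pyRange 0 n).countP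
                (fun t => decide (hi < t) && covB sc rest t) := by
        rw [← countP_disjoint _ _ (by
          intro x _ hx
          simp only [Bool.and_eq_true, decide_eq_true_eq] at hx
          omega)]
        apply List.countP_congr
        intro t ht
        have ht' := PySem.List.mem_pyRange_one.mp ht
        simp only [covB, List.any_eq_true, List.mem_cons, Bool.and_eq_true, Bool.or_eq_true,
          decide_eq_true_eq]
        constructor
        · rintro ⟨hrt, q, (rfl | hq), hcov⟩
          · left; omega
          · have hpq := hhd q hq
            by_cases ht2 : t ≤ hi
            · left; omega
            · right; exact ⟨by omega, q, hq, hcov⟩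
        · rintro (⟨ha, hb⟩ | ⟨ha, q, hq, hcov⟩)
          · exact ⟨by omega, p, Or.inl rfl, by omega⟩
          · exact ⟨by omega, q, Or.inr hq, hcov⟩
      rw [hsplit, count_interval n (lo - 1) hi (by omega) (by omega)]
      have hcast : ((hi - (lo - 1)).toNat : Int) = hi - lo + 1 := by
        rw [Int.toNat_of_nonneg (by omega)]; ring
      push_cast [hcast]
      ring

lemma unionSize_eq (n sc : Int) (hsc : 0 < sc) (ps : List Int) (hpair : ps.Pairwise (· < ·))
    (hmem : ∀ p ∈ ps, 0 ≤ p ∧ p < n) (hne : ps ≠ []) :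
    unionSize n sc ps = ((PySem.List.pyRange 0 n).countP (covB sc ps) : Int) := by
  cases ps with
  | nil => exact absurd rfl hne
  | cons p rest =>
    obtain ⟨hp0, hpn⟩ := hmem p List.mem_cons_self
    have hhd := (List.pairwise_cons.mp hpair).1
    have hpairt := (List.pairwise_cons.mp hpair).2
    have hmemt : ∀ q ∈ rest, 0 ≤ q ∧ q < n := fun q hq => hmem q (List.mem_cons_of_mem p hq)
    set lo := max 0 (p - sc) with hlo
    set hi := min (n - 1) (p + sc) with hhi
    have h1 : unionSize n sc (p :: rest) =
        totalOf ((p :: rest).foldl (mergeStep n sc) (0, none)) := rfl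
    rw [h1, List.foldl_cons]
    rw [show mergeStep n sc (0, none) p = (0, some (lo, hi)) from rfl]
    rw [merge_go n sc hsc rest 0 lo hi hpairt hmemt (by omega) (by omega)]
    have hsplit : (PySem.List.pyRange 0 n).countP (covB sc (p :: rest))
        = (PySem.List.pyRange 0 n).countP (fun t => decide (lo - 1 < t ∧ t ≤ hi))
          + (PySem.List.pyRange 0 n).countP (fun t => decide (hi < t) && covB sc rest t) := by
      rw [← countP_disjoint _ _ (by
        intro x _ hx
        simp only [Bool.and_eq_true, decide_eq_true_eq] at hx
        omega)]
      apply List.countP_congr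
      intro t ht
      have ht' := PySem.List.mem_pyRange_one.mp ht
      simp only [covB, List.any_eq_true, List.mem_cons, Bool.and_eq_true, Bool.or_eq_true,
        decide_eq_true_eq]
      constructor
      · rintro ⟨q, (rfl | hq), hcov⟩
        · left; omega
        · have hpq := hhd q hq
          by_cases ht2 : t ≤ hi
          · left; omega
          · right; exact ⟨by omega, q, hq, hcov⟩
      · rintro (⟨ha, hb⟩ | ⟨ha, q, hq, hcov⟩)
        · exact ⟨p, Or.inl rfl, by omega⟩
        · exact ⟨q, Or.inr hq, hcov⟩
    rw [hsplit, count_interval n (lo - 1) hi (by omega) (by omega)]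
    have hcast : ((hi - (lo - 1)).toNat : Int) = hi - lo + 1 := by
      rw [Int.toNat_of_nonneg (by omega)]; ring
    push_cast [hcast]
    ring

lemma getLast?_max {l : List Int} (hp : l.Pairwise (· < ·)) {a : Int}
    (h : l.getLast? = some a) : a ∈ l ∧ ∀ x ∈ l, x ≤ a := by
  have hne : l ≠ [] := by intro hnil; rw [hnil] at h; simp at h
  have hgl : a = l.getLast hne := by
    rw [List.getLast?_eq_some_getLast hne] at h; exact (Option.some_injective _ h).symm
  subst hgl
  refine ⟨List.getLast_mem hne, ?_⟩
  intro x hx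
  have hdec := List.dropLast_concat_getLast hne
  rw [← hdec] at hp hx
  rcases List.mem_append.mp hx with hx | hx
  · have := (List.pairwise_append.mp hp).2.2 x hx _ List.mem_cons_self
    omega
  · simp at hx; omega
lemma head?_min {l : List Int} (hp : l.Pairwise (· < ·)) {q : Int}
    (h : l.head? = some q) : q ∈ l ∧ ∀ x ∈ l, q ≤ x := by
  cases l with
  | nil => simp at h
  | cons b t =>
    simp at h
    subst h
    refine ⟨List.mem_cons_self, ?_⟩
    intro x hx
    rcases List.mem_cons.mp hx with rfl | hx
    · omega
    · have := (List.pairwise_cons.mp hp).1 x hx; omega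

lemma iso_go (sc : Int) (hsc : 0 ≤ sc) (ps : List Int) (hpair : ps.Pairwise (· < ·)) :
    ∀ (cur pre : List Int), ps = pre ++ cur →
      isoCount sc pre.getLast? cur = (cur.countP (fun p => !othB sc ps p) : Int) := by
  intro cur
  induction cur with
  | nil => intro pre _; simp [isoCount]
  | cons p rest ih =>
    intro pre hps
    have hps' : ps = (pre ++ [p]) ++ rest := by rw [hps]; simp
    have hlast : (pre ++ [p]).getLast? = some p := by simp
    have hsplit : pre.Pairwise (· < ·) ∧ (p :: rest).Pairwise (· < ·) ∧
        ∀ a ∈ pre, ∀ b ∈ p :: rest, a < b := by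
      rw [hps] at hpair
      exact ⟨(List.pairwise_append.mp hpair).1, (List.pairwise_append.mp hpair).2.1,
        (List.pairwise_append.mp hpair).2.2⟩
    obtain ⟨hppre, hpcur, hcross⟩ := hsplit
    have hmemps : ∀ x, x ∈ ps ↔ x ∈ pre ∨ x = p ∨ x ∈ rest := by
      intro x; rw [hps]; simp [List.mem_append]
    have hnear : ((match pre.getLast? with | some a => decide (p - a ≤ sc) | none => false) ||
        (match rest.head? with | some q => decide (q - p ≤ sc) | none => false))
        = othB sc ps p := by
      have hoth : othB sc ps p = true ↔ ∃ x ∈ ps, ¬x = p ∧ x ≤ p + sc ∧ p ≤ x + sc := by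
        simp [othB, List.any_eq_true]
      apply Bool.eq_iff_iff.mpr
      rw [hoth]
      constructor
      · intro h
        rcases Bool.or_eq_true_iff.mp h with h | h
        · cases hl : pre.getLast? with
          | none => rw [hl] at h; simp at h
          | some a =>
            rw [hl] at h
            have hd := decide_eq_true_eq.mp h
            obtain ⟨hamem, _⟩ := getLast?_max hppre hl
            have hap : a < p := hcross a hamem p List.mem_cons_self
            exact ⟨a, (hmemps a).mpr (Or.inl hamem), by omega, by omega, by omega⟩
        · cases hh : rest.head? with
          | none => rw [hh] at h; simp at h
          | some q =>
            rw [hh] at h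
            have hd := decide_eq_true_eq.mp h
            have hrest := (List.pairwise_cons.mp hpcur).2
            obtain ⟨hqmem, _⟩ := head?_min hrest hh
            have hpq : p < q := (List.pairwise_cons.mp hpcur).1 q hqmem
            exact ⟨q, (hmemps q).mpr (Or.inr (Or.inr hqmem)), by omega, by omega, by omega⟩
      · rintro ⟨x, hx, hxp, hx1, hx2⟩
        rcases (hmemps x).mp hx with hx | rfl | hx
        · -- x in pre, so pre nonempty: its last a satisfies p - a ≤ sc
          apply Bool.or_eq_true_iff.mpr; left
          have hne : pre ≠ [] := by intro h0; rw [h0] at hx; simp at hx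
          cases hl : pre.getLast? with
          | none => rw [List.getLast?_eq_none_iff] at hl; exact absurd hl hne
          | some a =>
            obtain ⟨hamem, hmax⟩ := getLast?_max hppre hl
            have := hmax x hx
            simp only [decide_eq_true_eq]
            omega
        · exact absurd rfl hxp
        · apply Bool.or_eq_true_iff.mpr; right
          have hne : rest ≠ [] := by intro h0; rw [h0] at hx; simp at hx
          cases hh : rest.head? with
          | none => rw [List.head?_eq_none_iff] at hh; exact absurd hh hne
          | some q =>
            have hrest := (List.pairwise_cons.mp hpcur).2
            obtain ⟨hqmem, hmin⟩ := head?_min hrest hh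
            have := hmin x hx
            have hpx : p < x := (List.pairwise_cons.mp hpcur).1 x hx
            simp only [decide_eq_true_eq]
            omega
    rw [show isoCount sc pre.getLast? (p :: rest) =
        (if ((match pre.getLast? with | some a => decide (p - a ≤ sc) | none => false) ||
             (match rest.head? with | some q => decide (q - p ≤ sc) | none => false))
         then 0 else 1) + isoCount sc (some p) rest from rfl]
    rw [hnear, ← hlast, ih (pre ++ [p]) hps']
    rw [List.countP_cons]
    cases h : othB sc ps p
    · simp
      omega
    · simp

lemma isoCount_eq (sc : Int) (hsc : 0 ≤ sc) (ps : List Int) (hpair : ps.Pairwise (· < ·)) :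
    isoCount sc none ps = (ps.countP (fun p => !othB sc ps p) : Int) := by
  have := iso_go sc hsc ps hpair ps [] (by simp)
  simpa using this

lemma oth_imp_cov {sc : Int} {ps : List Int} {t : Int} (h : othB sc ps t = true) :
    covB sc ps t = true := by
  simp only [othB, covB, List.any_eq_true, decide_eq_true_eq] at h ⊢
  obtain ⟨p, hp, _, h1, h2⟩ := h
  exact ⟨p, hp, h1, h2⟩

lemma cov_split (n sc : Int) (hsc : 0 < sc) (ps : List Int) (hpair : ps.Pairwise (· < ·))
    (hmem : ∀ p ∈ ps, 0 ≤ p ∧ p < n) :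
    (PySem.List.pyRange 0 n).countP (covB sc ps) =
      (PySem.List.pyRange 0 n).countP (othB sc ps) + ps.countP (fun p => !othB sc ps p) := by
  have step1 : (PySem.List.pyRange 0 n).countP (covB sc ps)
      = (PySem.List.pyRange 0 n).countP
          (fun t => othB sc ps t || (covB sc ps t && !othB sc ps t)) := by
    apply List.countP_congr
    intro t _
    cases h2 : othB sc ps t
    · simp
    · have h1 := oth_imp_cov h2
      simp [h1]
  rw [step1, countP_disjoint _ _ (by
    intro x _ hx
    obtain ⟨ha, hb⟩ := hx
    simp only [Bool.and_eq_true, Bool.not_eq_true'] at hb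
    rw [ha] at hb
    exact absurd hb.2 (by simp))]
  congr 1
  rw [List.countP_eq_length_filter, List.countP_eq_length_filter]
  congr 1
  apply sorted_ext ((PySem.List.pairwise_lt_pyRange_one 0 n).filter _) (hpair.filter _)
  intro t
  simp only [List.mem_filter, Bool.and_eq_true, Bool.not_eq_true']
  constructor
  · rintro ⟨htr, hcov, hnot⟩
    refine ⟨?_, hnot⟩
    obtain ⟨p, hp, hb⟩ := List.any_eq_true.mp hcov
    by_cases hpt : p = t
    · exact hpt ▸ hp
    · exfalso
      have : othB sc ps t = true := by
        simp only [othB, List.any_eq_true, decide_eq_true_eq]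
        exact ⟨p, hp, hpt, decide_eq_true_eq.mp hb⟩
      rw [this] at hnot; exact absurd hnot (by simp)
  · rintro ⟨htp, hnot⟩
    obtain ⟨ht0, htn⟩ := hmem t htp
    refine ⟨PySem.List.mem_pyRange_one.mpr ⟨ht0, htn⟩, ?_, hnot⟩
    simp only [covB, List.any_eq_true, decide_eq_true_eq]
    exact ⟨t, htp, by omega, by omega⟩

lemma mem_get_context (text : List String) (sc t : Int) (hsc : 0 < sc)
    (h2 : 2 * sc ≤ PySem.List.len text) (ht0 : 0 ≤ t) (htn : t < PySem.List.len text)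
    (w : String) :
    w ∈ get_context text t sc ↔ othB sc (psOf text w) t = true := by
  have hrhs : (othB sc (psOf text w) t = true) ↔
      ∃ p : Int, (0 ≤ p ∧ p < PySem.List.len text) ∧ PySem.List.pyGetD text p "" = w ∧
        p ≠ t ∧ p - sc ≤ t ∧ t ≤ p + sc := by
    simp only [othB, List.any_eq_true, decide_eq_true_eq]
    constructor
    · rintro ⟨p, hp, h1, hl, hr⟩
      obtain ⟨hb, hw⟩ := mem_psOf.mp hp
      exact ⟨p, hb, hw, h1, hl, hr⟩
    · rintro ⟨p, hb, hw, h1, hl, hr⟩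
      exact ⟨p, mem_psOf.mpr ⟨hb, hw⟩, h1, hl, hr⟩
  rw [hrhs]
  simp only [get_context]
  by_cases hb1 : t < sc
  · rw [if_pos hb1]
    simp only [List.mem_append, List.mem_map]
    constructor
    · rintro (⟨i, hi, hiw⟩ | ⟨i, hi, hiw⟩) <;> exact (fun hib => ⟨i, ⟨by omega, by omega⟩, hiw, by omega, by omega, by omega⟩) (PySem.List.mem_pyRange_one.mp hi)
    · rintro ⟨p, ⟨hp0, hpn⟩, hpw, hne, hl, hr⟩; exact if hpt : p < t then Or.inl ⟨p, PySem.List.mem_pyRange_one.mpr ⟨by omega, by omega⟩, hpw⟩ else Or.inr ⟨p, PySem.List.mem_pyRange_one.mpr ⟨by omega, by omega⟩, hpw⟩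
  · rw [if_neg hb1]
    by_cases hb2 : t > PySem.List.len text - 1 - sc
    · rw [if_pos hb2]
      simp only [List.mem_append, List.mem_map]
      constructor
      · rintro (⟨i, hi, hiw⟩ | ⟨i, hi, hiw⟩) <;> exact (fun hib => ⟨i, ⟨by omega, by omega⟩, hiw, by omega, by omega, by omega⟩) (PySem.List.mem_pyRange_one.mp hi)
      · rintro ⟨p, ⟨hp0, hpn⟩, hpw, hne, hl, hr⟩; exact if hpt : p < t then Or.inl ⟨p, PySem.List.mem_pyRange_one.mpr ⟨by omega, by omega⟩, hpw⟩ else Or.inr ⟨p, PySem.List.mem_pyRange_one.mpr ⟨by omega, by omega⟩, hpw⟩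
    · rw [if_neg hb2]
      simp only [List.mem_append, List.mem_map]
      constructor
      · rintro (⟨i, hi, hiw⟩ | ⟨i, hi, hiw⟩) <;> exact (fun hib => ⟨i, ⟨by omega, by omega⟩, hiw, by omega, by omega, by omega⟩) (PySem.List.mem_pyRange_one.mp hi)
      · rintro ⟨p, ⟨hp0, hpn⟩, hpw, hne, hl, hr⟩; exact if hpt : p < t then Or.inl ⟨p, PySem.List.mem_pyRange_one.mpr ⟨by omega, by omega⟩, hpw⟩ else Or.inr ⟨p, PySem.List.mem_pyRange_one.mpr ⟨by omega, by omega⟩, hpw⟩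

lemma ctx_nil (text : List String) (sc t : Int) (hsc : sc ≤ 0) (ht0 : 0 ≤ t)
    (htn : t < PySem.List.len text) : get_context text t sc = [] := by
  simp only [get_context]
  rw [if_neg (show ¬ t < sc by omega),
      if_neg (show ¬ t > PySem.List.len text - 1 - sc by omega)]
  rw [PySem.List.pyRange_one_eq_nil (show t ≤ t - sc by omega),
      PySem.List.pyRange_one_eq_nil (show t + sc + 1 ≤ t + 1 by omega)]
  simp

lemma getD_foldl_insert_zero (w : String) :
    ∀ (l : List String) (d : PySem.Dict String Int), d.getD w 0 = 0 →
      (l.foldl (fun d k => d.insert k 0) d).getD w 0 = 0 := by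
  intro l
  induction l with
  | nil => intro d h; simpa using h
  | cons k l ih =>
    intro d h
    rw [List.foldl_cons]
    apply ih
    by_cases hk : w = k
    · subst hk; rw [PySem.Dict.getD_insert_self]
    · rw [PySem.Dict.getD_insert_of_ne _ _ _ hk]; exact h

lemma keys_d0 (words : List String) :
    (words.foldl (fun d k => d.insert k 0) (PySem.Dict.empty : PySem.Dict String Int)).keys
      = PySem.Set.ofList words := by
  rw [PySem.Dict.keys_foldl_insert words (fun _ _ => 0) PySem.Dict.empty]
  rw [show (PySem.Dict.empty : PySem.Dict String Int).keys = ([] : List String) from rfl]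
  exact PySem.Set.update_empty words

lemma A_fold_getD (text : List String) (sc : Int) :
    ∀ (tgts : List Int) (d : PySem.Dict String Int) (w : String),
      ((tgts.foldl
          (fun d target =>
            (PySem.Set.ofList (get_context text target sc)).foldl
              (fun d word => d.modify word 0 (· + 1)) d) d).getD w 0)
        = d.getD w 0 + (tgts.countP (fun t => decide (w ∈ get_context text t sc)) : Int) := by
  intro tgts
  induction tgts with
  | nil => intro d w; simp
  | cons t tgts ih =>
    intro d w
    rw [List.foldl_cons, ih, PySem.Dict.getD_foldl_modify_add_one, List.countP_cons]
    have hcnt : List.count w (PySem.Set.ofList (get_context text t sc))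
        = if w ∈ get_context text t sc then 1 else 0 := by
      by_cases hw : w ∈ get_context text t sc
      · rw [if_pos hw]
        exact List.count_eq_one_of_mem (PySem.Set.nodup_ofList _)
          ((PySem.Set.mem_ofList _ _).mpr hw)
      · rw [if_neg hw]
        exact List.count_eq_zero.mpr (fun hc => hw ((PySem.Set.mem_ofList _ _).mp hc))
    rw [hcnt]
    by_cases hw : w ∈ get_context text t sc
    · simp [hw]
      ring
    · simp [hw]

lemma A_fold_keys (text : List String) (sc : Int) :
    ∀ (tgts : List Int) (d : PySem.Dict String Int),
      (∀ t ∈ tgts, ∀ x ∈ get_context text t sc, x ∈ d.keys) →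
      ((tgts.foldl
          (fun d target =>
            (PySem.Set.ofList (get_context text target sc)).foldl
              (fun d word => d.modify word 0 (· + 1)) d) d).keys) = d.keys := by
  intro tgts
  induction tgts with
  | nil => intro d _; rfl
  | cons t tgts ih =>
    intro d h
    rw [List.foldl_cons]
    have hkeys : ((PySem.Set.ofList (get_context text t sc)).foldl
        (fun d word => d.modify word 0 (· + 1)) d).keys = d.keys := by
      rw [PySem.Dict.keys_foldl_modify (PySem.Set.ofList (get_context text t sc)) 0
          (fun _ _ v => v + 1) d]
      rw [PySem.Set.update_eq_append_filter]
      have hnil : (PySem.Set.ofList (PySem.Set.ofList (get_context text t sc))).filter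
          (fun y => !PySem.Set.contains d.keys y) = [] := by
        apply List.filter_eq_nil_iff.mpr
        intro x hx
        have hx' : x ∈ get_context text t sc :=
          (PySem.Set.mem_ofList _ _).mp ((PySem.Set.mem_ofList _ _).mp hx)
        have hmem := h t List.mem_cons_self x hx'
        simp only [Bool.not_eq_true', Bool.not_eq_false]
        exact (PySem.Set.contains_iff d.keys x).mpr hmem
      rw [hnil, List.append_nil]
    rw [ih _ (by rw [hkeys]; exact fun t' ht' => h t' (List.mem_cons_of_mem _ ht')), hkeys]

lemma B_fold_getD (occ : PySem.Dict String (List Int)) (n sc : Int) :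
    ∀ (l : List String) (d : PySem.Dict String Int) (w : String), l.Nodup →
      ((l.foldl
          (fun d w =>
            if occ.contains w then
              d.insert w (unionSize n sc (occ.getD w []) - isoCount sc none (occ.getD w []))
            else d) d).getD w 0)
        = if w ∈ l ∧ occ.contains w = true then
            unionSize n sc (occ.getD w []) - isoCount sc none (occ.getD w [])
          else d.getD w 0 := by
  intro l
  induction l with
  | nil => intro d w _; simp
  | cons k l ih =>
    intro d w hnd
    have hk := (List.nodup_cons.mp hnd).1
    rw [List.foldl_cons, ih _ _ (List.nodup_cons.mp hnd).2]
    have hstep : ∀ v : Int, ((if occ.contains k then d.insert k v else d)).getD w 0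
        = if w = k ∧ occ.contains k = true then v else d.getD w 0 := by
      intro v
      by_cases hwk : w = k
      · subst hwk
        split_ifs with hc h2 h2
        · exact PySem.Dict.getD_insert_self d _ v 0
        · exact absurd ⟨rfl, hc⟩ h2
        · exact absurd h2.2 hc
        · rfl
      · split_ifs with hc h2 h2
        · exact absurd h2.1 hwk
        · exact PySem.Dict.getD_insert_of_ne _ _ _ hwk
        · exact absurd h2.1 hwk
        · rfl
    by_cases hwl : w ∈ l
    · have hwk : ¬ w = k := fun h => hk (h ▸ hwl)
      by_cases hc : occ.contains w = true
      · rw [if_pos (show w ∈ l ∧ occ.contains w = true from ⟨hwl, hc⟩),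
            if_pos (show w ∈ k :: l ∧ occ.contains w = true from ⟨List.mem_cons_of_mem _ hwl, hc⟩)]
      · rw [if_neg (show ¬(w ∈ l ∧ occ.contains w = true) from fun h => hc h.2),
            if_neg (show ¬(w ∈ k :: l ∧ occ.contains w = true) from fun h => hc h.2), hstep _,
            if_neg (show ¬(w = k ∧ occ.contains k = true) from fun h => hwk h.1)]
    · rw [if_neg (show ¬(w ∈ l ∧ occ.contains w = true) from fun h => hwl h.1)]
      by_cases hwk : w = k
      · subst hwk
        by_cases hc : occ.contains w = true
        · rw [hstep _, if_pos (show w = w ∧ occ.contains w = true from ⟨rfl, hc⟩),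
              if_pos (show w ∈ w :: l ∧ occ.contains w = true from ⟨List.mem_cons_self, hc⟩)]
        · rw [hstep _, if_neg (show ¬(w = w ∧ occ.contains w = true) from fun h => hc h.2),
              if_neg (show ¬(w ∈ w :: l ∧ occ.contains w = true) from fun h => hc h.2)]
      · rw [hstep _, if_neg (show ¬(w = k ∧ occ.contains k = true) from fun h => hwk h.1),
            if_neg (show ¬(w ∈ k :: l ∧ occ.contains w = true) from
              fun h => (List.mem_cons.mp h.1).elim hwk hwl)]

lemma B_fold_keys (occ : PySem.Dict String (List Int)) (n sc : Int) :
    ∀ (l : List String) (d : PySem.Dict String Int), (∀ w ∈ l, w ∈ d.keys) →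
      ((l.foldl
          (fun d w =>
            if occ.contains w then
              d.insert w (unionSize n sc (occ.getD w []) - isoCount sc none (occ.getD w []))
            else d) d).keys) = d.keys := by
  intro l
  induction l with
  | nil => intro d _; rfl
  | cons k l ih =>
    intro d h
    rw [List.foldl_cons]
    have hstep : ((if occ.contains k then
        d.insert k (unionSize n sc (occ.getD k []) - isoCount sc none (occ.getD k []))
        else d)).keys = d.keys := by
      split_ifs with hc
      · exact PySem.Dict.keys_insert_of_contains d _
          ((PySem.Dict.contains_iff_mem_keys d k).mpr (h k List.mem_cons_self))
      · rfl
    rw [ih _ (by rw [hstep]; exact fun w hw => h w (List.mem_cons_of_mem _ hw)), hstep]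

-- ===== VERDICT (by name: the statement is the Claim_ definition above) =====
theorem compute_df_spec : Claim_equal_compute_df := by
  intro text words ws _ hpre
  unfold Spec_compute_df
  simp only [compute_df, compute_df_alt]
  set sc := roundHalfDiv2 ws with hsc_def
  by_cases htriv : sc ≤ 0 ∨ PySem.List.len text = 0
  · rw [if_pos htriv]
    congr 1
    rcases htriv with hsc | hlen
    · rw [PySem.List.foldl_congr_mem _ _ (fun d _ => d) _ ?_, PySem.List.foldl_ignore]
      intro d t ht
      have ht' := PySem.List.mem_pyRange_one.mp ht
      rw [ctx_nil text sc t hsc ht'.1 ht'.2]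
      rfl
    · rw [PySem.List.pyRange_one_eq_nil (by omega)]
      rfl
  · rw [if_neg htriv]
    have hsc0 : 0 < sc := by by_contra hcon; exact htriv (Or.inl (by omega))
    have hn0 : ¬ PySem.List.len text = 0 := fun hcon => htriv (Or.inr hcon)
    rcases hpre with h | h | ⟨h2sc, hsub⟩
    · omega
    · rw [h] at hn0; simp [PySem.List.len_eq] at hn0
    have hocc : (PySem.List.enumerate text 0).foldl
        (fun d q => d.modify q.2 [] (fun l => l ++ [q.1])) PySem.Dict.empty = occD text := rfl
    rw [hocc]
    set d0 := words.foldl (fun d k => d.insert k 0)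
        (PySem.Dict.empty : PySem.Dict String Int) with hd0
    have hkeys0 : d0.keys = PySem.Set.ofList words := keys_d0 words
    have hnd0 : d0.keys.Nodup := by rw [hkeys0]; exact PySem.Set.nodup_ofList words
    have hgd0 : ∀ w : String, d0.getD w 0 = 0 := fun w =>
      getD_foldl_insert_zero w words PySem.Dict.empty (PySem.Dict.getD_empty w 0)
    have hctxsub : ∀ t ∈ PySem.List.pyRange 0 (PySem.List.len text),
        ∀ x ∈ get_context text t sc, x ∈ d0.keys := by
      intro t ht x hx
      have ht' := PySem.List.mem_pyRange_one.mp ht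
      have hoth := (mem_get_context text sc t hsc0 h2sc ht'.1 ht'.2 x).mp hx
      obtain ⟨p, hp, _⟩ := List.any_eq_true.mp hoth
      obtain ⟨⟨hp0, hpn⟩, hpw⟩ := mem_psOf.mp hp
      have hxtext : x ∈ text := by
        rw [← hpw]
        apply PySem.List.pyGetD_mem
        unfold PySem.Raise.InRange
        simp [PySem.List.len_eq] at hpn ⊢
        omega
      rw [hkeys0]
      exact (PySem.Set.mem_ofList _ _).mpr (hsub x hxtext)
    have hAkeys := A_fold_keys text sc (PySem.List.pyRange 0 (PySem.List.len text)) d0 hctxsub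
    have hBkeys := B_fold_keys (occD text) (PySem.List.len text) sc d0.keys d0 (fun w hw => hw)
    rw [PySem.Dict.items_eq_map_keys _ (by rw [hAkeys]; exact hnd0) 0,
        PySem.Dict.items_eq_map_keys _ (by rw [hBkeys]; exact hnd0) 0]
    rw [hAkeys, hBkeys]
    apply List.map_congr_left
    intro w hw
    rw [A_fold_getD text sc (PySem.List.pyRange 0 (PySem.List.len text)) d0 w]
    rw [B_fold_getD (occD text) (PySem.List.len text) sc d0.keys d0 w hnd0]
    rw [hgd0 w]
    by_cases hwt : w ∈ text
    · have hc : (occD text).contains w = true := (occD_contains text w).mpr hwt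
      rw [if_pos ⟨hw, hc⟩, occD_getD]
      have hpair := pairwise_psOf text w
      have hmem : ∀ p ∈ psOf text w, 0 ≤ p ∧ p < PySem.List.len text := by
        intro p hp
        have := mem_psOf.mp hp
        exact this.1
      rw [unionSize_eq (PySem.List.len text) sc hsc0 _ hpair hmem (psOf_ne_nil hwt)]
      rw [isoCount_eq sc (by omega) _ hpair]
      have hA : (PySem.List.pyRange 0 (PySem.List.len text)).countP
            (fun t => decide (w ∈ get_context text t sc))
          = (PySem.List.pyRange 0 (PySem.List.len text)).countP (othB sc (psOf text w)) := by
        apply List.countP_congr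
        intro t ht
        have ht' := PySem.List.mem_pyRange_one.mp ht
        simp only [decide_eq_true_eq]
        exact mem_get_context text sc t hsc0 h2sc ht'.1 ht'.2 w
      rw [hA, cov_split (PySem.List.len text) sc hsc0 _ hpair hmem]
      simp only [Prod.mk.injEq, true_and]
      push_cast
      ring
    · have hc : (occD text).contains w = false := by
        cases h : (occD text).contains w
        · rfl
        · exact absurd ((occD_contains text w).mp h) hwt
      rw [if_neg (by rw [hc]; exact fun hh => by simpa using hh.2)]
      have hA : (PySem.List.pyRange 0 (PySem.List.len text)).countP
          (fun t => decide (w ∈ get_context text t sc)) = 0 := by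
        apply List.countP_eq_zero.mpr
        intro t ht
        have ht' := PySem.List.mem_pyRange_one.mp ht
        simp only [decide_eq_true_eq]
        intro hmem
        have hoth := (mem_get_context text sc t hsc0 h2sc ht'.1 ht'.2 w).mp hmem
        rw [psOf_eq_nil hwt] at hoth
        simp [othB] at hoth
      rw [hA]
      simp
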